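-- pv_equiv track=rewrite | github.com/sigurdvaa/adventofcode | 2015/05-doesnt-he-have-intern-elves-for-this.py | find_repeated_pairs
-- ===== SOURCE A (Python) =====
-- def find_repeated_pairs(string: str):
--     repeated_pairs = list()
--     i = 0
--     while i < len(string) - 3:
--         match = False
--         pair = string[i] + string[i + 1]
--         for s in range(i + 2, len(string) - 1):
--             if pair == string[s] + string[s + 1]:
--                 repeated_pairs.append(pair)
--                 match = True
--                 break
--
--         if match:
--             i += 2
--         else:
--             i += 1
--
--     return repeated_pairs
-- ===== SOURCE B (Python) =====
-- def find_repeated_pairs(string: str):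
--     # One pass builds last occurrence index of every pair; the scan then uses it.
--     last = {}
--     for j in range(len(string) - 1):
--         last[string[j] + string[j + 1]] = j
--     out = []
--     i = 0
--     n = len(string)
--     while i < n - 3:
--         pair = string[i] + string[i + 1]
--         if last.get(pair, -1) >= i + 2:
--             out.append(pair)
--             i += 2
--         else:
--             i += 1
--     return out
-- ===== Notes on version B (the rewrite author's own statement) =====
-- stated objective: faster
-- what changed: A rescans the rest of the string for each position (nested loops); B builds in one pass a dict mapping each two-char pair to its last occurrence index, and the scan then decides each position by a single dict lookup instead of an inner rescan.
import Mathlib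
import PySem

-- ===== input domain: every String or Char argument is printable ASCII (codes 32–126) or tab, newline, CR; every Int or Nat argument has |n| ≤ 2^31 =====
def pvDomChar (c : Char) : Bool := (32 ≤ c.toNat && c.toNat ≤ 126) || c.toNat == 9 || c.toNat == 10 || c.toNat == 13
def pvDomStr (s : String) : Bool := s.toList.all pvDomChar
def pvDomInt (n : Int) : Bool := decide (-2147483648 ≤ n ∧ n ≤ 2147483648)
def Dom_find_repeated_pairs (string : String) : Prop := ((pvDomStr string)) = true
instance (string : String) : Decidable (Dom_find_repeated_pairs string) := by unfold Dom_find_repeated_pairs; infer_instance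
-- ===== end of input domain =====

-- B replaces A's quadratic inner rescan by a one-pass dict of each pair's last
-- occurrence index, keeping the same skip-by-two outer scan (objective: faster).

-- ===== PORT A =====

-- string[i] + string[i + 1]: both indices are in range at every use site, so getD is exact
def pvPairAt (l : List Char) (i : Nat) : String :=
  String.ofList [l.getD i ' ', l.getD (i + 1) ' ']

-- the inner 'for s in range(i+2, len(string)-1): if pair == …: …; break' as a scan for the first match
def pvInnerA (l : List Char) (pair : String) : List Int → Bool
  | [] => false
  | s :: rest => if pair = pvPairAt l s.toNat then true else pvInnerA l pair rest

-- the outer while loop of A; acc is repeated_pairs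
def pvLoopA (l : List Char) (i : Nat) (acc : List String) : List String :=
  if h : (i : Int) < (l.length : Int) - 3 then
    let pair := pvPairAt l i
    if pvInnerA l pair (PySem.List.pyRange ((i : Int) + 2) ((l.length : Int) - 1) 1) then
      pvLoopA l (i + 2) (acc ++ [pair])
    else
      pvLoopA l (i + 1) acc
  else acc
termination_by l.length - i
decreasing_by all_goals omega

def find_repeated_pairs (string : String) : List String :=
  pvLoopA string.toList 0 []

-- ===== PORT B =====

-- the 'for j in range(len(string)-1): last[string[j]+string[j+1]] = j' pass of B
def pvLastB (l : List Char) : PySem.Dict String Int :=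
  (PySem.List.pyRange 0 ((l.length : Int) - 1) 1).foldl
    (fun d j => d.insert (pvPairAt l j.toNat) j) PySem.Dict.empty

-- the while loop of B; out is the output list
def pvLoopB (l : List Char) (last : PySem.Dict String Int) (i : Nat) (out : List String) : List String :=
  if h : (i : Int) < (l.length : Int) - 3 then
    let pair := pvPairAt l i
    if (i : Int) + 2 ≤ last.getD pair (-1) then
      pvLoopB l last (i + 2) (out ++ [pair])
    else
      pvLoopB l last (i + 1) out
  else out
termination_by l.length - i
decreasing_by all_goals omega

def find_repeated_pairs_alt (string : String) : List String :=
  pvLoopB string.toList (pvLastB string.toList) 0 []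

-- ===== PRECONDITION & SPEC =====
def Spec_find_repeated_pairs (string : String) (out : List String) : Prop := out = find_repeated_pairs_alt string
instance (string : String) (out : List String) : Decidable (Spec_find_repeated_pairs string out) := by unfold Spec_find_repeated_pairs; infer_instance

-- ===== CLAIM (what is proved, stated in full; the proofs are below) =====
def Claim_equal_find_repeated_pairs : Prop := ∀ (string : String), Dom_find_repeated_pairs string → Spec_find_repeated_pairs string (find_repeated_pairs string)

-- ===== LEMMAS AND PROOFS =====

lemma innerA_eq_true_iff (l : List Char) (pair : String) (xs : List Int) :
    pvInnerA l pair xs = true ↔ ∃ s ∈ xs, pair = pvPairAt l s.toNat := by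
  induction xs with
  | nil => simp [pvInnerA]
  | cons s rest ih =>
    by_cases h : pair = pvPairAt l s.toNat
    · simp [pvInnerA, h]
    · simp [pvInnerA, h, ih]

lemma getD_foldl_insert_ge (k : Int → String) (t : Int) (ht : -1 < t) (js : List Int)
    (hs : js.Pairwise (· ≤ ·)) (key : String) :
    t ≤ ((js.foldl (fun d j => d.insert (k j) j) PySem.Dict.empty).getD key (-1)) ↔
      ∃ j ∈ js, k j = key ∧ t ≤ j := by
  induction js using List.reverseRecOn with
  | nil => simp; omega
  | append_singleton js j ih =>
    have hle : ∀ x ∈ js, x ≤ j := by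
      intro x hx
      exact (List.pairwise_append.mp hs).2.2 x hx j (List.mem_singleton.mpr rfl)
    rw [List.foldl_append, List.foldl_cons, List.foldl_nil, PySem.Dict.getD_insert]
    by_cases h : key = k j
    · subst h
      rw [if_pos rfl]
      constructor
      · intro hj
        exact ⟨j, List.mem_append_right _ (List.mem_singleton.mpr rfl), rfl, hj⟩
      · rintro ⟨j', hj', _, htj'⟩
        rcases List.mem_append.mp hj' with hin | hone
        · exact le_trans htj' (hle j' hin)
        · rw [List.mem_singleton.mp hone] at htj'; exact htj'
    · rw [if_neg h, ih (List.pairwise_append.mp hs).1]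
      constructor
      · rintro ⟨j', hj', hk, htj'⟩
        exact ⟨j', List.mem_append_left _ hj', hk, htj'⟩
      · rintro ⟨j', hj', hk, htj'⟩
        rcases List.mem_append.mp hj' with hin | hone
        · exact ⟨j', hin, hk, htj'⟩
        · rw [List.mem_singleton.mp hone] at hk; exact absurd hk.symm h

lemma cond_iff (l : List Char) (i : Nat) :
    (pvInnerA l (pvPairAt l i) (PySem.List.pyRange ((i : Int) + 2) ((l.length : Int) - 1) 1) = true)
      ↔ (i : Int) + 2 ≤ (pvLastB l).getD (pvPairAt l i) (-1) := by
  rw [innerA_eq_true_iff, pvLastB,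
    getD_foldl_insert_ge _ _ (by omega) _
      ((PySem.List.pairwise_lt_pyRange_one 0 ((l.length : Int) - 1)).imp le_of_lt)]
  simp only [PySem.List.mem_pyRange_one]
  constructor
  · rintro ⟨s, ⟨hs1, hs2⟩, he⟩
    exact ⟨s, ⟨by omega, hs2⟩, he.symm, by omega⟩
  · rintro ⟨j, ⟨hj0, hj1⟩, hk, hjt⟩
    exact ⟨j, ⟨by omega, hj1⟩, hk.symm⟩

lemma loop_eq (l : List Char) (i : Nat) (acc : List String) :
    pvLoopA l i acc = pvLoopB l (pvLastB l) i acc := by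
  rw [pvLoopA, pvLoopB]
  by_cases h : (i : Int) < (l.length : Int) - 3
  · simp only [dif_pos h]
    by_cases hc : (i : Int) + 2 ≤ (pvLastB l).getD (pvPairAt l i) (-1)
    · rw [if_pos ((cond_iff l i).mpr hc), if_pos hc]
      exact loop_eq l (i + 2) (acc ++ [pvPairAt l i])
    · rw [if_neg (fun hb => hc ((cond_iff l i).mp hb)), if_neg hc]
      exact loop_eq l (i + 1) acc
  · simp only [dif_neg h]
termination_by l.length - i
decreasing_by all_goals omega

-- ===== VERDICT (by name: the statement is the Claim_ definition above) =====
theorem find_repeated_pairs_spec : Claim_equal_find_repeated_pairs := by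
  intro s _
  unfold Spec_find_repeated_pairs find_repeated_pairs find_repeated_pairs_alt
  exact loop_eq s.toList 0 []
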